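-- pv_equiv track=rewrite | github.com/ShaunakMishra25/DSA-Solve | Array/max_potholes_removed.py | max_potholes_removed_bfs
-- ===== SOURCE A (Python) =====
-- def max_potholes_removed_bfs(n, roadA, roadB):
--     from collections import deque
--
--     # Prefix Sum for efficient pothole counting
--     def build_prefix_sum(road):
--         prefix = [0] * (n + 1)
--         for i in range(n):
--             prefix[i + 1] = prefix[i] + (1 if road[i] in ['X', 'x'] else 0)
--         return prefix
--
--     prefixA = build_prefix_sum(roadA)
--     prefixB = build_prefix_sum(roadB)
--
--     def count_potholes(prefix, start, end):
--         if start < 0 or end < 0 or start > end or end >= n: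
--             return 0
--         return prefix[end + 1] - prefix[start]
--
--     # BFS-based path checking to avoid recursion
--     def path_exists(blockA_start, blockA_end, blockB_start, blockB_end):
--         queue = deque()
--         visited = set()
--
--         # Try starting positions
--         if not (blockA_start <= 0 <= blockA_end):
--             queue.append((0, 0))  # (position, road)
--             visited.add((0, 0))
--
--         if not (blockB_start <= 0 <= blockB_end):
--             queue.append((0, 1))
--             visited.add((0, 1))
--
--         while queue:
--             pos, road = queue.popleft()
--
--             if pos == n - 1:
--                 return True
--
--             # Try moving forward on same road
--             if pos + 1 < n:
--                 next_blocked = False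
--                 if road == 0 and blockA_start <= pos + 1 <= blockA_end:
--                     next_blocked = True
--                 if road == 1 and blockB_start <= pos + 1 <= blockB_end:
--                     next_blocked = True
--
--                 if not next_blocked:
--                     # All cells are passable - no need to check for potholes
--                     if (pos + 1, road) not in visited:
--                         queue.append((pos + 1, road))
--                         visited.add((pos + 1, road))
--
--             # Try switching roads at same position
--             other_road = 1 - road
--             other_blocked = False
--             if other_road == 0 and blockA_start <= pos <= blockA_end:
--                 other_blocked = True
--             if other_road == 1 and blockB_start <= pos <= blockB_end:
--                 other_blocked = True
--
--             if not other_blocked: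
--                 # All cells are passable - no need to check for potholes
--                 if (pos, other_road) not in visited:
--                     queue.append((pos, other_road))
--                     visited.add((pos, other_road))
--
--         return False
--
--     # Greedy approach
--     max_removed = 0
--
--     # Generate segments with pothole counts
--     segments_A = [(-1, -1, 0)]
--     for start in range(n):
--         for end in range(start, n):
--             potholes = count_potholes(prefixA, start, end)
--             segments_A.append((start, end, potholes))
--
--     segments_B = [(-1, -1, 0)]
--     for start in range(n):
--         for end in range(start, n):
--             potholes = count_potholes(prefixB, start, end)
--             segments_B.append((start, end, potholes))
--
--     # Sort by pothole count (greedy)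
--     segments_A.sort(key=lambda x: x[2], reverse=True)
--     segments_B.sort(key=lambda x: x[2], reverse=True)
--
--     # Find best combination
--     for startA, endA, potholesA in segments_A:
--         for startB, endB, potholesB in segments_B:
--             if path_exists(startA, endA, startB, endB):
--                 total_removed = potholesA + potholesB
--                 max_removed = max(max_removed, total_removed)
--                 break  # Greedy choice
--
--     return max_removed
-- ===== SOURCE B (Python) =====
-- def max_potholes_removed_bfs(n, roadA, roadB):
--     # Closed form: a pair of blocked intervals keeps a path iff one is empty or
--     # they are separated by a gap of at least 2 columns; counts are monotone in
--     # interval inclusion, so only "whole prefix / whole suffix" splits matter.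
--     if n <= 0:
--         return 0
--     prefA = [0]
--     for i in range(n):
--         prefA.append(prefA[-1] + (1 if roadA[i] in ('X', 'x') else 0))
--     prefB = [0]
--     for i in range(n):
--         prefB.append(prefB[-1] + (1 if roadB[i] in ('X', 'x') else 0))
--     totA, totB = prefA[n], prefB[n]
--     best = max(totA, totB)
--     for c in range(n - 2):
--         best = max(best,
--                    prefA[c + 1] + totB - prefB[c + 2],
--                    prefB[c + 1] + totA - prefA[c + 2])
--     return best
-- ===== Notes on version B (the rewrite author's own statement) =====
-- stated objective: faster
-- what changed: Replaced the enumeration of all O(n^2)x O(n^2) blocked-interval pairs each checked by BFS with a single prefix-sum pass: a pair of blocked intervals keeps a path open iff one is empty or they are 2+ columns apart, and counts are monotone under interval inclusion, so the answer is max(totalA, totalB, best prefix/suffix split at each column).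
import Mathlib
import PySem

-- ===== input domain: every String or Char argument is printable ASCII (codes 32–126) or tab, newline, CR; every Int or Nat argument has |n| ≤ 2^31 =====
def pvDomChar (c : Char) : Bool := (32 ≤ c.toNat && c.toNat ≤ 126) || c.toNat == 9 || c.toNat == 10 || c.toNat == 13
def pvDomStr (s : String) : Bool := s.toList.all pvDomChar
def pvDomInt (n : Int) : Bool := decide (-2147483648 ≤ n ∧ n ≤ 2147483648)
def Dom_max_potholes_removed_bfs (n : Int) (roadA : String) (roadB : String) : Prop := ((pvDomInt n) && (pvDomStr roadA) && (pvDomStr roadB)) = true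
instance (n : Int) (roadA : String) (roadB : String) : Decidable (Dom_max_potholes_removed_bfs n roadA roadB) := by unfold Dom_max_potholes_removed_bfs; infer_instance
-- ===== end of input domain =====

-- B replaces A's enumeration of all interval pairs checked by BFS with one prefix-sum
-- pass over the split points (objective: faster; measured asymptotic change).

-- ===== PORT A =====
-- helper of A: build_prefix_sum (prefix = [0]*(n+1); prefix[i+1] = prefix[i] + …)
def pvBuildPrefix (n : Int) (road : List Char) : List Int :=
  (PySem.List.pyRange 0 n 1).foldl
    (fun pfx i =>
      PySem.List.pySetD pfx (i + 1)
        (PySem.List.pyGetD pfx i 0 +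
          (if PySem.List.pyGetD road i ' ' = 'X' ∨ PySem.List.pyGetD road i ' ' = 'x' then 1 else 0)))
    (List.replicate (n + 1).toNat 0)

-- helper of A: count_potholes
def pvCountPotholes (n : Int) (pfx : List Int) (start e : Int) : Int :=
  if start < 0 ∨ e < 0 ∨ start > e ∨ e ≥ n then 0
  else PySem.List.pyGetD pfx (e + 1) 0 - PySem.List.pyGetD pfx start 0

-- helper of A: the BFS while-loop of path_exists (fuel only makes the while-loop total;
-- it is proved never to run out below)
def pvBfsLoop (n a1 a2 b1 b2 : Int) :
    Nat → List (Int × Int) → PySem.Set (Int × Int) → Bool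
  | 0, _, _ => false
  | _ + 1, [], _ => false
  | fuel + 1, (pos, road) :: q, visited =>
    if pos = n - 1 then true
    else
      -- try moving forward on same road
      let st1 :=
        if pos + 1 < n ∧
            ¬((road = 0 ∧ a1 ≤ pos + 1 ∧ pos + 1 ≤ a2) ∨
              (road = 1 ∧ b1 ≤ pos + 1 ∧ pos + 1 ≤ b2)) ∧
            (pos + 1, road) ∉ visited then
          (q ++ [(pos + 1, road)], PySem.Set.add visited (pos + 1, road))
        else (q, visited)
      -- try switching roads at same position
      let other := 1 - road
      let st2 :=
        if ¬((other = 0 ∧ a1 ≤ pos ∧ pos ≤ a2) ∨ (other = 1 ∧ b1 ≤ pos ∧ pos ≤ b2)) ∧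
            (pos, other) ∉ st1.2 then
          (st1.1 ++ [(pos, other)], PySem.Set.add st1.2 (pos, other))
        else st1
      pvBfsLoop n a1 a2 b1 b2 fuel st2.1 st2.2

-- helper of A: path_exists
def pvPathExists (n a1 a2 b1 b2 : Int) : Bool :=
  let st1 :=
    if ¬(a1 ≤ 0 ∧ 0 ≤ a2) then
      ([((0 : Int), (0 : Int))], PySem.Set.add (PySem.Set.empty) ((0 : Int), (0 : Int)))
    else ([], PySem.Set.empty)
  let st2 :=
    if ¬(b1 ≤ 0 ∧ 0 ≤ b2) then
      (st1.1 ++ [((0 : Int), (1 : Int))], PySem.Set.add st1.2 ((0 : Int), (1 : Int)))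
    else st1
  pvBfsLoop n a1 a2 b1 b2 (2 * (n.toNat + 1) + 2) st2.1 st2.2

-- helper of A: the segment-generation double loop (sentinel first, then appends)
def pvSegments (n : Int) (pfx : List Int) : List (Int × Int × Int) :=
  (PySem.List.pyRange 0 n 1).foldl
    (fun acc start =>
      (PySem.List.pyRange start n 1).foldl
        (fun acc2 e => acc2 ++ [(start, e, pvCountPotholes n pfx start e)]) acc)
    [(-1, -1, 0)]

def max_potholes_removed_bfs (n : Int) (roadA : String) (roadB : String) : Int :=
  let prefixA := pvBuildPrefix n roadA.toList
  let prefixB := pvBuildPrefix n roadB.toList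
  let segmentsA := PySem.List.sorted (pvSegments n prefixA) (fun t => t.2.2) true
  let segmentsB := PySem.List.sorted (pvSegments n prefixB) (fun t => t.2.2) true
  segmentsA.foldl
    (fun maxRemoved sA =>
      match segmentsB.find? (fun sB => pvPathExists n sA.1 sA.2.1 sB.1 sB.2.1) with
      | some sB => max maxRemoved (sA.2.2 + sB.2.2)
      | none => maxRemoved)
    0

-- ===== PORT B =====
-- helper of B: prefix-sum list built by appending (pref.append(pref[-1] + …))
def pvAltPrefix (n : Int) (road : List Char) : List Int :=
  (PySem.List.pyRange 0 n 1).foldl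
    (fun p i =>
      p ++ [PySem.List.pyGetD p (-1) 0 +
        (if PySem.List.pyGetD road i ' ' = 'X' ∨ PySem.List.pyGetD road i ' ' = 'x' then 1 else 0)])
    [0]

def max_potholes_removed_bfs_alt (n : Int) (roadA : String) (roadB : String) : Int :=
  if n ≤ 0 then 0
  else
    let prefA := pvAltPrefix n roadA.toList
    let prefB := pvAltPrefix n roadB.toList
    let totA := PySem.List.pyGetD prefA n 0
    let totB := PySem.List.pyGetD prefB n 0
    (PySem.List.pyRange 0 (n - 2) 1).foldl
      (fun best c =>
        max (max best
              (PySem.List.pyGetD prefA (c + 1) 0 + totB - PySem.List.pyGetD prefB (c + 2) 0))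
            (PySem.List.pyGetD prefB (c + 1) 0 + totA - PySem.List.pyGetD prefA (c + 2) 0))
      (max totA totB)

-- ===== PRECONDITION & SPEC =====
-- Pre_ excludes exactly the inputs where A raises IndexError: n larger than the
-- length of either road string (build_prefix_sum reads road[i] for i in range(n)).
def Pre_max_potholes_removed_bfs (n : Int) (roadA : String) (roadB : String) : Prop :=
  n ≤ PySem.Str.len roadA ∧ n ≤ PySem.Str.len roadB
instance (n : Int) (roadA : String) (roadB : String) : Decidable (Pre_max_potholes_removed_bfs n roadA roadB) := by unfold Pre_max_potholes_removed_bfs; infer_instance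

def pvWitness_max_potholes_removed_bfs : Int × String × String := (3, ".X.", "Xx.")

def Spec_max_potholes_removed_bfs (n : Int) (roadA : String) (roadB : String) (out : Int) : Prop := out = max_potholes_removed_bfs_alt n roadA roadB
instance (n : Int) (roadA : String) (roadB : String) (out : Int) : Decidable (Spec_max_potholes_removed_bfs n roadA roadB out) := by unfold Spec_max_potholes_removed_bfs; infer_instance

-- ===== CLAIM (what is proved, stated in full; the proofs are below) =====
def Claim_equal_max_potholes_removed_bfs : Prop := ∀ (n : Int) (roadA : String) (roadB : String), Dom_max_potholes_removed_bfs n roadA roadB → Pre_max_potholes_removed_bfs n roadA roadB → Spec_max_potholes_removed_bfs n roadA roadB (max_potholes_removed_bfs n roadA roadB)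

-- ===== LEMMAS AND PROOFS =====
-- proof-layer definitions
def pvIsX (c : Char) : Bool := c == 'X' || c == 'x'
def pvP (l : List Char) (i : Nat) : Int := ((l.take i).countP pvIsX : Int)
def pvPI (l : List Char) (i : Int) : Int := pvP l i.toNat
def pvBlocked (a1 a2 b1 b2 p r : Int) : Prop :=
  (r = 0 ∧ a1 ≤ p ∧ p ≤ a2) ∨ (r = 1 ∧ b1 ≤ p ∧ p ≤ b2)
inductive pvReach (n a1 a2 b1 b2 : Int) : Int → Int → Prop
  | startA : ¬(a1 ≤ 0 ∧ 0 ≤ a2) → pvReach n a1 a2 b1 b2 0 0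
  | startB : ¬(b1 ≤ 0 ∧ 0 ≤ b2) → pvReach n a1 a2 b1 b2 0 1
  | forward {p r : Int} : pvReach n a1 a2 b1 b2 p r → p + 1 < n →
      ¬ pvBlocked a1 a2 b1 b2 (p + 1) r → pvReach n a1 a2 b1 b2 (p + 1) r
  | switch {p r : Int} : pvReach n a1 a2 b1 b2 p r →
      ¬ pvBlocked a1 a2 b1 b2 p (1 - r) → pvReach n a1 a2 b1 b2 p (1 - r)
def pvStart (a1 a2 b1 b2 : Int) (s : Int × Int) : Prop :=
  (s = (0, 0) ∧ ¬(a1 ≤ 0 ∧ 0 ≤ a2)) ∨ (s = (0, 1) ∧ ¬(b1 ≤ 0 ∧ 0 ≤ b2))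
def pvSucc (n a1 a2 b1 b2 : Int) (s t : Int × Int) : Prop :=
  (t = (s.1 + 1, s.2) ∧ s.1 + 1 < n ∧ ¬ pvBlocked a1 a2 b1 b2 (s.1 + 1) s.2) ∨
  (t = (s.1, 1 - s.2) ∧ ¬ pvBlocked a1 a2 b1 b2 s.1 (1 - s.2))
def pvValid (n : Int) (s : Int × Int) : Prop :=
  0 ≤ s.1 ∧ (s.1 ≤ n - 1 ∨ s.1 = 0) ∧ (s.2 = 0 ∨ s.2 = 1)
structure pvInv (n a1 a2 b1 b2 : Int) (q v : List (Int × Int)) : Prop where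
  nodup : v.Nodup
  qsub : ∀ s ∈ q, s ∈ v
  reach : ∀ s ∈ v, pvReach n a1 a2 b1 b2 s.1 s.2
  valid : ∀ s ∈ v, pvValid n s
  starts : ∀ s, pvStart a1 a2 b1 b2 s → s ∈ v
  processed : ∀ s ∈ v, s ∉ q → s.1 ≠ n - 1 ∧ ∀ t, pvSucc n a1 a2 b1 b2 s t → t ∈ v
def pvFeas (a1 a2 b1 b2 : Int) : Prop :=
  a1 < 0 ∨ b1 < 0 ∨ a2 + 2 ≤ b1 ∨ b2 + 2 ≤ a1
def pvShape (n s e : Int) : Prop := (s = -1 ∧ e = -1) ∨ (0 ≤ s ∧ s ≤ e ∧ e ≤ n - 1)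
-- BFS correctness
theorem pv_reach_nonneg {n a1 a2 b1 b2 p r : Int}
    (h : pvReach n a1 a2 b1 b2 p r) : 0 ≤ p := by
  induction h with
  | startA _ => omega
  | startB _ => omega
  | forward _ _ _ ih => omega
  | switch _ _ ih => exact ih
theorem pv_reach_succ {n a1 a2 b1 b2 : Int} {s t : Int × Int}
    (h : pvReach n a1 a2 b1 b2 s.1 s.2) (hs : pvSucc n a1 a2 b1 b2 s t) :
    pvReach n a1 a2 b1 b2 t.1 t.2 := by
  rcases hs with ⟨rfl, h1, h2⟩ | ⟨rfl, h2⟩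
  · exact pvReach.forward h h1 h2
  · exact pvReach.switch h h2
theorem pv_valid_succ {n a1 a2 b1 b2 : Int} {s t : Int × Int}
    (h : pvValid n s) (hs : pvSucc n a1 a2 b1 b2 s t) : pvValid n t := by
  obtain ⟨h1, h2, h3⟩ := h
  rcases hs with ⟨rfl, hlt, _⟩ | ⟨rfl, _⟩
  · exact ⟨by omega, by omega, h3⟩
  · exact ⟨h1, h2, by omega⟩
theorem pv_step {n a1 a2 b1 b2 : Int} (fuel : Nat) (pos road : Int)
    (q : List (Int × Int)) (v : PySem.Set (Int × Int)) (hpos : pos ≠ n - 1) :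
    ∃ added : List (Int × Int),
      pvBfsLoop n a1 a2 b1 b2 (fuel + 1) ((pos, road) :: q) v
        = pvBfsLoop n a1 a2 b1 b2 fuel (q ++ added) (v ++ added) ∧
      added.Nodup ∧ (∀ t ∈ added, t ∉ v) ∧
      (∀ t ∈ added, pvSucc n a1 a2 b1 b2 (pos, road) t) ∧
      (∀ t, pvSucc n a1 a2 b1 b2 (pos, road) t → t ∈ v ++ added) := by
  rw [pvBfsLoop]
  rw [if_neg hpos]
  by_cases h1 : pos + 1 < n ∧
      ¬((road = 0 ∧ a1 ≤ pos + 1 ∧ pos + 1 ≤ a2) ∨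
        (road = 1 ∧ b1 ≤ pos + 1 ∧ pos + 1 ≤ b2)) ∧
      (pos + 1, road) ∉ v
  · rw [if_pos h1]
    dsimp only
    have hadd1 : PySem.Set.add v (pos + 1, road) = v ++ [(pos + 1, road)] :=
      PySem.Set.add_of_not_mem h1.2.2
    by_cases h2 : ¬((1 - road = 0 ∧ a1 ≤ pos ∧ pos ≤ a2) ∨ (1 - road = 1 ∧ b1 ≤ pos ∧ pos ≤ b2)) ∧
        (pos, 1 - road) ∉ PySem.Set.add v (pos + 1, road)
    · rw [if_pos h2]
      have hy : (pos, 1 - road) ∉ v ++ [(pos + 1, road)] := by rw [← hadd1]; exact h2.2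
      have hadd2 : PySem.Set.add (v ++ [(pos + 1, road)]) (pos, 1 - road)
          = (v ++ [(pos + 1, road)]) ++ [(pos, 1 - road)] := PySem.Set.add_of_not_mem hy
      refine ⟨[(pos + 1, road), (pos, 1 - road)], ?_, ?_, ?_, ?_, ?_⟩
      · rw [hadd1, hadd2]
        simp
      · refine List.nodup_cons.mpr ⟨?_, List.nodup_singleton _⟩
        intro hmem
        simp only [List.mem_singleton, Prod.mk.injEq] at hmem
        omega
      · intro t ht
        rcases List.mem_cons.mp ht with rfl | ht
        · exact h1.2.2
        · simp only [List.mem_singleton] at ht; subst ht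
          intro hmem
          exact hy (by simp [hmem])
      · intro t ht
        rcases List.mem_cons.mp ht with rfl | ht
        · exact Or.inl ⟨rfl, h1.1, h1.2.1⟩
        · simp only [List.mem_singleton] at ht; subst ht
          exact Or.inr ⟨rfl, h2.1⟩
      · intro t hsucc
        rcases hsucc with ⟨rfl, _, _⟩ | ⟨rfl, _⟩ <;> simp
    · rw [if_neg h2]
      refine ⟨[(pos + 1, road)], by rw [hadd1], List.nodup_singleton _, ?_, ?_, ?_⟩
      · intro t ht; simp only [List.mem_singleton] at ht; subst ht; exact h1.2.2
      · intro t ht; simp only [List.mem_singleton] at ht; subst ht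
        exact Or.inl ⟨rfl, h1.1, h1.2.1⟩
      · intro t hsucc
        rcases hsucc with ⟨rfl, _, _⟩ | ⟨rfl, hnb⟩
        · simp
        · have hmem : (pos, 1 - road) ∈ PySem.Set.add v (pos + 1, road) := by
            by_contra hc
            exact h2 ⟨hnb, hc⟩
          rw [hadd1] at hmem
          simpa using hmem
  · rw [if_neg h1]
    dsimp only
    by_cases h2 : ¬((1 - road = 0 ∧ a1 ≤ pos ∧ pos ≤ a2) ∨ (1 - road = 1 ∧ b1 ≤ pos ∧ pos ≤ b2)) ∧
        (pos, 1 - road) ∉ v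
    · rw [if_pos h2]
      refine ⟨[(pos, 1 - road)], by rw [PySem.Set.add_of_not_mem h2.2], List.nodup_singleton _,
        ?_, ?_, ?_⟩
      · intro t ht; simp only [List.mem_singleton] at ht; subst ht; exact h2.2
      · intro t ht; simp only [List.mem_singleton] at ht; subst ht
        exact Or.inr ⟨rfl, h2.1⟩
      · intro t hsucc
        rcases hsucc with ⟨rfl, hlt, hnb⟩ | ⟨rfl, hnb⟩
        · have hmem : (pos + 1, road) ∈ v := by
            by_contra hc
            exact h1 ⟨hlt, hnb, hc⟩
          simp [hmem]
        · simp
    · rw [if_neg h2]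
      refine ⟨[], by simp, List.nodup_nil, by simp, by simp, ?_⟩
      intro t hsucc
      rcases hsucc with ⟨rfl, hlt, hnb⟩ | ⟨rfl, hnb⟩
      · have hmem : (pos + 1, road) ∈ v := by
          by_contra hc
          exact h1 ⟨hlt, hnb, hc⟩
        simp [hmem]
      · have hmem : (pos, 1 - road) ∈ v := by
          by_contra hc
          exact h2 ⟨hnb, hc⟩
        simp [hmem]
theorem pv_bfs_sound {n a1 a2 b1 b2 : Int} :
    ∀ (fuel : Nat) (q : List (Int × Int)) (v : PySem.Set (Int × Int)),
      (∀ s ∈ q, pvReach n a1 a2 b1 b2 s.1 s.2) →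
      pvBfsLoop n a1 a2 b1 b2 fuel q v = true →
      ∃ r, pvReach n a1 a2 b1 b2 (n - 1) r := by
  intro fuel
  induction fuel with
  | zero => intro q v _ h; simp [pvBfsLoop] at h
  | succ fuel ih =>
    intro q v hq h
    match q with
    | [] => simp [pvBfsLoop] at h
    | (pos, road) :: q' =>
      by_cases hpos : pos = n - 1
      · subst hpos
        exact ⟨road, hq (n - 1, road) (List.mem_cons_self ..)⟩
      · obtain ⟨added, heq, _, _, hsucc, _⟩ := pv_step fuel pos road q' v hpos
        rw [heq] at h
        refine ih _ _ ?_ h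
        intro s hs
        rcases List.mem_append.mp hs with hs | hs
        · exact hq _ (by simp [hs])
        · exact pv_reach_succ (hq _ (by simp)) (hsucc _ hs)
theorem pv_reach_mem_closed {n a1 a2 b1 b2 : Int} {v : List (Int × Int)}
    (hstart : ∀ s, pvStart a1 a2 b1 b2 s → s ∈ v)
    (hclosed : ∀ s ∈ v, ∀ t, pvSucc n a1 a2 b1 b2 s t → t ∈ v) :
    ∀ p r, pvReach n a1 a2 b1 b2 p r → (p, r) ∈ v := by
  intro p r h
  induction h with
  | startA h => exact hstart _ (Or.inl ⟨rfl, h⟩)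
  | startB h => exact hstart _ (Or.inr ⟨rfl, h⟩)
  | forward h hlt hnb ih => exact hclosed _ ih _ (Or.inl ⟨rfl, hlt, hnb⟩)
  | switch h hnb ih => exact hclosed _ ih _ (Or.inr ⟨rfl, hnb⟩)
theorem pv_vcard {n : Int} {v : List (Int × Int)} (hnd : v.Nodup)
    (hval : ∀ s ∈ v, pvValid n s) : v.length ≤ 2 * (n.toNat + 1) := by
  classical
  have hmap : (v.map (fun s => 2 * s.1.toNat + s.2.toNat)).Nodup := by
    refine List.Nodup.map_on ?_ hnd
    intro x hx y hy hxy
    obtain ⟨hx1, _, hx3⟩ := hval x hx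
    obtain ⟨hy1, _, hy3⟩ := hval y hy
    obtain ⟨xa, xb⟩ := x
    obtain ⟨ya, yb⟩ := y
    simp only at hx1 hx3 hy1 hy3 hxy
    have : xa = ya ∧ xb = yb := by omega
    simp [this.1, this.2]
  have hlt : ∀ x ∈ v.map (fun s => 2 * s.1.toNat + s.2.toNat), x < 2 * (n.toNat + 1) := by
    intro x hx
    obtain ⟨s, hs, rfl⟩ := List.mem_map.mp hx
    obtain ⟨h1, h2, h3⟩ := hval s hs
    omega
  have hsub : (v.map (fun s => 2 * s.1.toNat + s.2.toNat)).toFinset ⊆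
      Finset.range (2 * (n.toNat + 1)) := by
    intro x hx
    exact Finset.mem_range.mpr (hlt x (List.mem_toFinset.mp hx))
  have := Finset.card_le_card hsub
  rw [List.toFinset_card_of_nodup hmap, Finset.card_range, List.length_map] at this
  exact this
theorem pv_bfs_complete {n a1 a2 b1 b2 : Int} :
    ∀ (fuel : Nat) (q : List (Int × Int)) (v : PySem.Set (Int × Int)),
      pvInv n a1 a2 b1 b2 q v →
      1 + q.length + (2 * (n.toNat + 1) - v.length) ≤ fuel →
      pvBfsLoop n a1 a2 b1 b2 fuel q v = false →
      ∀ r, ¬ pvReach n a1 a2 b1 b2 (n - 1) r := by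
  intro fuel
  induction fuel with
  | zero => intro q v _ hf _; omega
  | succ fuel ih =>
    intro q v hinv hf hfalse r hr
    match q, hfalse with
    | [], hfalse =>
      have hclosed : ∀ s ∈ v, ∀ t, pvSucc n a1 a2 b1 b2 s t → t ∈ v :=
        fun s hs t ht => (hinv.processed s hs (by simp)).2 t ht
      have hmem := pv_reach_mem_closed hinv.starts hclosed (n - 1) r hr
      exact (hinv.processed _ hmem (by simp)).1 rfl
    | (pos, road) :: q', hfalse =>
      by_cases hpos : pos = n - 1
      · rw [pvBfsLoop, if_pos hpos] at hfalse
        simp at hfalse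
      · obtain ⟨added, heq, hnd, hfresh, hsucc, hcover⟩ := pv_step fuel pos road q' v hpos
        rw [heq] at hfalse
        have hheadv : (pos, road) ∈ v := hinv.qsub _ (by simp)
        have hinv' : pvInv n a1 a2 b1 b2 (q' ++ added) (v ++ added) := by
          refine ⟨?_, ?_, ?_, ?_, ?_, ?_⟩
          · rw [List.nodup_append]
            exact ⟨hinv.nodup, hnd, fun a ha b hb hab => hfresh b hb (hab ▸ ha)⟩
          · intro s hs
            rcases List.mem_append.mp hs with hs | hs
            · exact List.mem_append.mpr (Or.inl (hinv.qsub _ (by simp [hs])))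
            · exact List.mem_append.mpr (Or.inr hs)
          · intro s hs
            rcases List.mem_append.mp hs with hs | hs
            · exact hinv.reach _ hs
            · exact pv_reach_succ (hinv.reach _ hheadv) (hsucc _ hs)
          · intro s hs
            rcases List.mem_append.mp hs with hs | hs
            · exact hinv.valid _ hs
            · exact pv_valid_succ (hinv.valid _ hheadv) (hsucc _ hs)
          · intro s hs
            exact List.mem_append.mpr (Or.inl (hinv.starts s hs))
          · intro s hs hnq
            rcases List.mem_append.mp hs with hs | hs
            · by_cases hshead : s = (pos, road)
              · subst hshead
                exact ⟨hpos, hcover⟩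
              · have hsq : s ∉ (pos, road) :: q' := by
                  intro hm
                  rcases List.mem_cons.mp hm with hm | hm
                  · exact hshead hm
                  · exact hnq (List.mem_append.mpr (Or.inl hm))
                obtain ⟨hne, hcl⟩ := hinv.processed s hs hsq
                exact ⟨hne, fun t ht => List.mem_append.mpr (Or.inl (hcl t ht))⟩
            · exact absurd (List.mem_append.mpr (Or.inr hs)) hnq
        have hcard : (v ++ added).length ≤ 2 * (n.toNat + 1) :=
          pv_vcard hinv'.nodup hinv'.valid
        refine ih (q' ++ added) (v ++ added) hinv' ?_ hfalse r hr
        simp only [List.length_append] at hcard ⊢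
        simp only [List.length_cons] at hf
        omega
theorem pv_pathExists_iff (n a1 a2 b1 b2 : Int) :
    pvPathExists n a1 a2 b1 b2 = true ↔ ∃ r, pvReach n a1 a2 b1 b2 (n - 1) r := by
  have hini : ∀ (X : List (Int × Int) × PySem.Set (Int × Int)) (q0 : List (Int × Int)),
      X = (q0, q0) →
      (∀ s ∈ q0, pvStart a1 a2 b1 b2 s) → (∀ s, pvStart a1 a2 b1 b2 s → s ∈ q0) →
      q0.Nodup → q0.length ≤ 2 →
      (pvBfsLoop n a1 a2 b1 b2 (2 * (n.toNat + 1) + 2) X.1 X.2 = true ↔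
        ∃ r, pvReach n a1 a2 b1 b2 (n - 1) r) := by
    rintro X q0 rfl hq0 hq0' hnd hlen
    constructor
    · intro h
      refine pv_bfs_sound _ _ _ ?_ h
      intro s hs
      rcases hq0 s hs with ⟨rfl, hc⟩ | ⟨rfl, hc⟩
      · exact pvReach.startA hc
      · exact pvReach.startB hc
    · intro hex
      by_contra hfb
      have hfalse : pvBfsLoop n a1 a2 b1 b2 (2 * (n.toNat + 1) + 2) q0 q0 = false :=
        Bool.eq_false_iff.mpr (fun h => hfb h)
      obtain ⟨r, hr⟩ := hex
      have hinv : pvInv n a1 a2 b1 b2 q0 q0 := by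
        refine ⟨hnd, fun s hs => hs, ?_, ?_, hq0', fun s hs hns => absurd hs hns⟩
        · intro s hs
          rcases hq0 s hs with ⟨rfl, hc⟩ | ⟨rfl, hc⟩
          · exact pvReach.startA hc
          · exact pvReach.startB hc
        · intro s hs
          rcases hq0 s hs with ⟨rfl, hc⟩ | ⟨rfl, hc⟩
          · exact ⟨le_refl 0, Or.inr rfl, Or.inl rfl⟩
          · exact ⟨le_refl 0, Or.inr rfl, Or.inr rfl⟩
      exact pv_bfs_complete _ _ _ hinv (by omega) hfalse r hr
  unfold pvPathExists
  by_cases hA : ¬(a1 ≤ 0 ∧ 0 ≤ a2) <;> by_cases hB : ¬(b1 ≤ 0 ∧ 0 ≤ b2)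
  · refine hini _ [((0:Int),(0:Int)), ((0:Int),(1:Int))] ?_ ?_ ?_ (by simp) (by simp)
    · simp only [if_pos hA, if_pos hB]
      rfl
    · intro s hs
      rcases List.mem_cons.mp hs with rfl | hs
      · exact Or.inl ⟨rfl, hA⟩
      · simp only [List.mem_singleton] at hs; subst hs
        exact Or.inr ⟨rfl, hB⟩
    · intro s hst
      rcases hst with ⟨rfl, _⟩ | ⟨rfl, _⟩ <;> simp
  · refine hini _ [((0:Int),(0:Int))] ?_ ?_ ?_ (by simp) (by simp)
    · simp only [if_pos hA, if_neg hB]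
      rfl
    · intro s hs
      simp only [List.mem_singleton] at hs; subst hs
      exact Or.inl ⟨rfl, hA⟩
    · intro s hst
      rcases hst with ⟨rfl, _⟩ | ⟨rfl, hc⟩
      · simp
      · exact absurd hc (by simpa using hB)
  · refine hini _ [((0:Int),(1:Int))] ?_ ?_ ?_ (by simp) (by simp)
    · simp only [if_neg hA, if_pos hB]
      rfl
    · intro s hs
      simp only [List.mem_singleton] at hs; subst hs
      exact Or.inr ⟨rfl, hB⟩
    · intro s hst
      rcases hst with ⟨rfl, hc⟩ | ⟨rfl, _⟩
      · exact absurd hc (by simpa using hA)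
      · simp
  · refine hini _ [] ?_ (by simp) ?_ (by simp) (by simp)
    · simp only [if_neg hA, if_neg hB]
      rfl
    · intro s hst
      rcases hst with ⟨rfl, hc⟩ | ⟨rfl, hc⟩
      · exact absurd hc (by simpa using hA)
      · exact absurd hc (by simpa using hB)
-- reachability in closed form
theorem pv_run {n a1 a2 b1 b2 : Int} (k : Nat) :
    ∀ p r, pvReach n a1 a2 b1 b2 p r → p + (k : Int) ≤ n - 1 →
      (∀ j : Int, p < j → j ≤ p + (k : Int) → ¬ pvBlocked a1 a2 b1 b2 j r) →
      pvReach n a1 a2 b1 b2 (p + (k : Int)) r := by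
  induction k with
  | zero => intro p r h _ _; simpa using h
  | succ k ih =>
    intro p r h hb hfree
    have hcast : ((k + 1 : Nat) : Int) = (k : Int) + 1 := by push_cast; ring
    rw [hcast] at hb ⊢
    have h1 : pvReach n a1 a2 b1 b2 (p + (k : Int)) r := by
      refine ih p r h (by omega) ?_
      intro j hj1 hj2
      exact hfree j hj1 (by omega)
    have h2 := pvReach.forward h1 (show p + (k : Int) + 1 < n by omega)
      (hfree (p + (k : Int) + 1) (by omega) (by omega))
    convert h2 using 1
    ring
theorem pv_run' {n a1 a2 b1 b2 p q r : Int}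
    (h : pvReach n a1 a2 b1 b2 p r) (hpq : p ≤ q) (hq : q ≤ n - 1)
    (hfree : ∀ j : Int, p < j → j ≤ q → ¬ pvBlocked a1 a2 b1 b2 j r) :
    pvReach n a1 a2 b1 b2 q r := by
  have hq' : q = p + ((q - p).toNat : Int) := by omega
  rw [hq']
  refine pv_run _ p r h (by omega) ?_
  intro j hj1 hj2
  exact hfree j hj1 (by omega)
theorem pv_reach_bound {n a1 a2 b1 b2 : Int}
    (ha : 0 ≤ a1 ∧ a1 ≤ a2 ∧ a2 ≤ n - 1) (hb : 0 ≤ b1 ∧ b1 ≤ b2 ∧ b2 ≤ n - 1)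
    (hab : b1 ≤ a2 + 1 ∧ a1 ≤ b2 + 1) :
    ∀ p r, pvReach n a1 a2 b1 b2 p r →
      (r = 0 ∨ r = 1) ∧ p ≤ a2 ∧ p ≤ b2 ∧ ¬ pvBlocked a1 a2 b1 b2 p r := by
  intro p r h
  induction h with
  | startA h => simp only [pvBlocked] at *; first | omega | (norm_num <;> omega)
  | startB h => simp only [pvBlocked] at *; first | omega | (norm_num <;> omega)
  | forward h hlt hnb ih => simp only [pvBlocked] at *; first | omega | (norm_num <;> omega)
  | switch h hnb ih => simp only [pvBlocked] at *; first | omega | (norm_num <;> omega)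
theorem pv_reach_iff {n a1 a2 b1 b2 : Int} (hn : 1 ≤ n)
    (hA : pvShape n a1 a2) (hB : pvShape n b1 b2) :
    (∃ r, pvReach n a1 a2 b1 b2 (n - 1) r) ↔ pvFeas a1 a2 b1 b2 := by
  constructor
  · rintro ⟨r, hr⟩
    by_contra hnf
    simp only [pvFeas, not_or, not_lt] at hnf
    obtain ⟨ha1, hb1, hgap1, hgap2⟩ := hnf
    have ha : 0 ≤ a1 ∧ a1 ≤ a2 ∧ a2 ≤ n - 1 := by
      rcases hA with ⟨h1, h2⟩ | h; · omega
      · exact h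
    have hb : 0 ≤ b1 ∧ b1 ≤ b2 ∧ b2 ≤ n - 1 := by
      rcases hB with ⟨h1, h2⟩ | h; · omega
      · exact h
    have := pv_reach_bound ha hb (by omega) (n - 1) r hr
    simp only [pvBlocked] at this
    omega
  · intro hfeas
    by_cases hA1 : a1 < 0
    · have ha2 : a2 = -1 := by
        rcases hA with ⟨_, h⟩ | h; · exact h
        · omega
      have h0 : pvReach n a1 a2 b1 b2 0 0 := pvReach.startA (by omega)
      refine ⟨0, pv_run' h0 (by omega) (by omega) ?_⟩
      intro j hj1 hj2
      simp only [pvBlocked]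
      omega
    · by_cases hB1 : b1 < 0
      · have hb2 : b2 = -1 := by
          rcases hB with ⟨_, h⟩ | h; · exact h
          · omega
        have h0 : pvReach n a1 a2 b1 b2 0 1 := pvReach.startB (by omega)
        refine ⟨1, pv_run' h0 (by omega) (by omega) ?_⟩
        intro j hj1 hj2
        simp only [pvBlocked]
        omega
      · have ha : 0 ≤ a1 ∧ a1 ≤ a2 ∧ a2 ≤ n - 1 := by
          rcases hA with ⟨h1, _⟩ | h; · omega
          · exact ⟨by omega, h.2⟩
        have hb : 0 ≤ b1 ∧ b1 ≤ b2 ∧ b2 ≤ n - 1 := by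
          rcases hB with ⟨h1, _⟩ | h; · omega
          · exact ⟨by omega, h.2⟩
        rcases hfeas with h | h | hgap | hgap
        · omega
        · omega
        · -- A-interval first, B-interval at least 2 later: row 1 then row 0
          have h0 : pvReach n a1 a2 b1 b2 0 1 := pvReach.startB (by omega)
          have h1 : pvReach n a1 a2 b1 b2 (a2 + 1) 1 := by
            refine pv_run' h0 (by omega) (by omega) ?_
            intro j hj1 hj2
            simp only [pvBlocked]
            omega
          have h2 := pvReach.switch h1 (show ¬ pvBlocked a1 a2 b1 b2 (a2 + 1) (1 - 1) by
            simp only [pvBlocked]; omega)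
          have h2' : pvReach n a1 a2 b1 b2 (a2 + 1) 0 := by
            have h11 : (1 : Int) - 1 = 0 := by norm_num
            rwa [h11] at h2
          refine ⟨0, pv_run' h2' (by omega) (by omega) ?_⟩
          intro j hj1 hj2
          simp only [pvBlocked]
          omega
        · -- B-interval first: row 0 then row 1
          have h0 : pvReach n a1 a2 b1 b2 0 0 := pvReach.startA (by omega)
          have h1 : pvReach n a1 a2 b1 b2 (b2 + 1) 0 := by
            refine pv_run' h0 (by omega) (by omega) ?_
            intro j hj1 hj2
            simp only [pvBlocked]
            omega
          have h2 := pvReach.switch h1 (show ¬ pvBlocked a1 a2 b1 b2 (b2 + 1) (1 - 0) by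
            simp only [pvBlocked]; omega)
          have h2' : pvReach n a1 a2 b1 b2 (b2 + 1) 1 := by
            have h11 : (1 : Int) - 0 = 1 := by norm_num
            rwa [h11] at h2
          refine ⟨1, pv_run' h2' (by omega) (by omega) ?_⟩
          intro j hj1 hj2
          simp only [pvBlocked]
          omega
theorem pv_pathExists_shape {n a1 a2 b1 b2 : Int} (hn : 1 ≤ n)
    (hA : pvShape n a1 a2) (hB : pvShape n b1 b2) :
    pvPathExists n a1 a2 b1 b2 = true ↔ pvFeas a1 a2 b1 b2 :=
  (pv_pathExists_iff n a1 a2 b1 b2).trans (pv_reach_iff hn hA hB)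

theorem pv_pathExists_nonpos {n a1 a2 b1 b2 : Int} (hn : n ≤ 0) :
    pvPathExists n a1 a2 b1 b2 = false := by
  rcases Bool.eq_false_or_eq_true (pvPathExists n a1 a2 b1 b2) with h | h
  swap
  · exact h
  · obtain ⟨r, hr⟩ := (pv_pathExists_iff n a1 a2 b1 b2).mp h
    have := pv_reach_nonneg hr
    omega

-- prefix sums
theorem pvP_succ {l : List Char} {k : Nat} (hk : k < l.length) :
    pvP l (k + 1) = pvP l k + (if l[k] = 'X' ∨ l[k] = 'x' then 1 else 0) := by
  simp only [pvP, List.take_add_one, List.getElem?_eq_getElem hk, Option.toList_some,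
    List.countP_append, List.countP_singleton]
  by_cases h : l[k] = 'X' ∨ l[k] = 'x'
  · rw [if_pos h]
    rcases h with h | h <;> simp [pvIsX, h] <;> push_cast <;> ring
  · rw [if_neg h]
    push Not at h
    simp [pvIsX, h.1, h.2]
theorem pvPI_mono {l : List Char} {i j : Int} (h : i ≤ j) : pvPI l i ≤ pvPI l j := by
  simp only [pvPI, pvP, Nat.cast_le]
  have h2 : i.toNat ≤ j.toNat := by omega
  calc (l.take i.toNat).countP pvIsX = ((l.take j.toNat).take i.toNat).countP pvIsX := by
        rw [List.take_take, Nat.min_eq_left h2]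
    _ ≤ (l.take j.toNat).countP pvIsX := List.Sublist.countP_le (List.take_sublist _ _)
theorem pvPI_nonneg (l : List Char) (i : Int) : 0 ≤ pvPI l i := by
  simp [pvPI, pvP]

theorem pvPI_zero (l : List Char) : pvPI l 0 = 0 := by
  simp [pvPI, pvP]

theorem pv_getD_mapRange {f : Nat → Int} {m : Nat} {i : Int} (h0 : 0 ≤ i) (h1 : i ≤ (m : Int)) :
    PySem.List.pyGetD ((List.range (m + 1)).map f) i 0 = f i.toNat := by
  rw [PySem.List.pyGetD_eq_getElem _ _ h0 (by simp; omega)]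
  simp
theorem pv_inc_eq {l : List Char} {k : Nat} (hk : k < l.length) :
    (if PySem.List.pyGetD l (k : Int) ' ' = 'X' ∨ PySem.List.pyGetD l (k : Int) ' ' = 'x' then (1:Int) else 0)
      = (if l[k] = 'X' ∨ l[k] = 'x' then (1:Int) else 0) := by
  rw [PySem.List.pyGetD_eq_getElem _ _ (by omega) (by omega)]
  simp
theorem pv_buildPrefix_eq {n : Int} {l : List Char} (hn : 0 ≤ n) (hl : n ≤ (l.length : Int)) :
    pvBuildPrefix n l = (List.range (n.toNat + 1)).map (pvP l) := by
  have hrep : (n + 1).toNat = n.toNat + 1 := by omega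
  have key : ∀ k : Nat, k ≤ n.toNat →
      (PySem.List.pyRange 0 (k : Int) 1).foldl
        (fun pfx i =>
          PySem.List.pySetD pfx (i + 1)
            (PySem.List.pyGetD pfx i 0 +
              (if PySem.List.pyGetD l i ' ' = 'X' ∨ PySem.List.pyGetD l i ' ' = 'x' then 1 else 0)))
        (List.replicate (n.toNat + 1) 0)
      = (List.range (n.toNat + 1)).map (fun i => if i ≤ k then pvP l i else 0) := by
    intro k
    induction k with
    | zero =>
      intro _
      rw [PySem.List.pyRange_one_eq_nil (by omega)]
      simp only [List.foldl_nil]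
      apply List.ext_getElem (by simp)
      intro i h1 h2
      simp only [List.getElem_replicate, List.getElem_map, List.getElem_range]
      have : ¬ (i ≤ 0) ∨ i = 0 := by omega
      rcases Nat.eq_zero_or_pos i with rfl | hi
      · simp [pvP]
      · rw [if_neg (by omega)]
    | succ k ih =>
      intro hk1
      have hk : k ≤ n.toNat := by omega
      have hkl : k < l.length := by omega
      have hsplit : PySem.List.pyRange 0 ((k:Int) + 1) 1
          = PySem.List.pyRange 0 (k:Int) 1 ++ [(k:Int)] :=
        PySem.List.pyRange_one_succ_right (by omega)
      push_cast
      rw [hsplit, List.foldl_append, ih hk]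
      simp only [List.foldl_cons, List.foldl_nil]
      rw [pv_getD_mapRange (f := fun i => if i ≤ k then pvP l i else 0) (by omega) (by omega)]
      rw [pv_inc_eq hkl]
      simp only [Int.toNat_natCast, if_pos (le_refl k)]
      have hc : (k:Int) + 1 = ((k + 1 : Nat) : Int) := by push_cast; ring
      rw [hc, PySem.List.pySetD_natCast]
      apply List.ext_getElem (by simp)
      intro i h1 h2
      simp only [List.length_set, List.length_map, List.length_range] at h1
      rw [List.getElem_set]
      simp only [List.getElem_map, List.getElem_range]
      by_cases hik : i = k + 1
      · subst hik
        rw [if_pos rfl, if_pos (le_refl _)]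
        exact (pvP_succ hkl).symm
      · rw [if_neg (by omega)]
        by_cases hle : i ≤ k
        · rw [if_pos hle, if_pos (by omega)]
        · rw [if_neg hle, if_neg (by omega)]
  have hn' : n = (n.toNat : Int) := by omega
  unfold pvBuildPrefix
  rw [hrep, hn']
  simp only [Int.toNat_natCast]
  rw [key n.toNat (le_refl _)]
  apply List.ext_getElem (by simp)
  intro i h1 h2
  simp only [List.getElem_map, List.getElem_range]
  rw [if_pos (by simp at h1; omega)]
theorem pv_altPrefix_eq {n : Int} {l : List Char} (hn : 0 ≤ n) (hl : n ≤ (l.length : Int)) :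
    pvAltPrefix n l = (List.range (n.toNat + 1)).map (pvP l) := by
  have key : ∀ k : Nat, k ≤ n.toNat →
      (PySem.List.pyRange 0 (k : Int) 1).foldl
        (fun p i =>
          p ++ [PySem.List.pyGetD p (-1) 0 +
            (if PySem.List.pyGetD l i ' ' = 'X' ∨ PySem.List.pyGetD l i ' ' = 'x' then 1 else 0)])
        [0]
      = (List.range (k + 1)).map (pvP l) := by
    intro k
    induction k with
    | zero =>
      intro _
      rw [PySem.List.pyRange_one_eq_nil (by omega)]
      simp [pvP]
    | succ k ih =>
      intro hk1
      have hk : k ≤ n.toNat := by omega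
      have hkl : k < l.length := by omega
      have hsplit : PySem.List.pyRange 0 ((k:Int) + 1) 1
          = PySem.List.pyRange 0 (k:Int) 1 ++ [(k:Int)] :=
        PySem.List.pyRange_one_succ_right (by omega)
      push_cast
      rw [hsplit, List.foldl_append, ih hk]
      simp only [List.foldl_cons, List.foldl_nil]
      rw [List.range_succ, List.map_append]
      simp only [List.map_cons, List.map_nil]
      rw [PySem.List.pyGetD_neg_one_append_singleton]
      rw [pv_inc_eq hkl]
      rw [List.range_succ (n := k + 1), List.map_append]
      simp only [List.map_cons, List.map_nil, List.append_assoc]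
      rw [← pvP_succ hkl]
      simp [List.range_succ]
  have hn' : n = (n.toNat : Int) := by omega
  unfold pvAltPrefix
  rw [hn']
  simp only [Int.toNat_natCast]
  rw [key n.toNat (le_refl _)]
theorem pv_count_real {n : Int} {l : List Char} {s e : Int}
    (hs : 0 ≤ s) (hse : s ≤ e) (he : e ≤ n - 1) :
    pvCountPotholes n ((List.range (n.toNat + 1)).map (pvP l)) s e = pvPI l (e + 1) - pvPI l s := by
  rw [pvCountPotholes, if_neg (by omega)]
  rw [pv_getD_mapRange (by omega) (by omega), pv_getD_mapRange hs (by omega)]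
  rfl
-- segments and folds
theorem pv_segments_eq (n : Int) (pfx : List Int) :
    pvSegments n pfx =
      (-1, -1, 0) :: (PySem.List.pyRange 0 n 1).flatMap
        (fun s => (PySem.List.pyRange s n 1).map (fun e => (s, e, pvCountPotholes n pfx s e))) := by
  unfold pvSegments
  simp only [PySem.List.foldl_append_singleton_eq_map]
  rw [PySem.List.foldl_append_eq_flatMap]
  rfl
theorem pv_mem_segments {n : Int} {pfx : List Int} {s e v : Int} :
    (s, e, v) ∈ pvSegments n pfx ↔
      (s = -1 ∧ e = -1 ∧ v = 0) ∨ (0 ≤ s ∧ s ≤ e ∧ e ≤ n - 1 ∧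
        v = pvCountPotholes n pfx s e) := by
  rw [pv_segments_eq]
  simp only [List.mem_cons, List.mem_flatMap, List.mem_map, PySem.List.mem_pyRange_one,
    Prod.mk.injEq]
  constructor
  · rintro (⟨h1, h2, h3⟩ | ⟨s', ⟨hs0, hsn⟩, e', ⟨hes, hen⟩, h1, h2, h3⟩)
    · exact Or.inl ⟨h1, h2, h3⟩
    · subst h1; subst h2; subst h3
      exact Or.inr ⟨hs0, hes, by omega, rfl⟩
  · rintro (⟨h1, h2, h3⟩ | ⟨h1, h2, h3, h4⟩)
    · exact Or.inl ⟨h1, h2, h3⟩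
    · exact Or.inr ⟨s, ⟨h1, by omega⟩, e, ⟨h2, by omega⟩, rfl, rfl, h4.symm⟩
theorem pv_foldl_max_init_le {α : Type} (l : List α) (g : α → Int) (init : Int) :
    init ≤ l.foldl (fun m x => max m (g x)) init := by
  induction l generalizing init with
  | nil => simp
  | cons x t ih => exact le_trans (le_max_left _ _) (ih _)
theorem pv_foldl_max_mem {α : Type} (g : α → Int) {l : List α} {x : α} (hx : x ∈ l) :
    ∀ init, g x ≤ l.foldl (fun m y => max m (g y)) init := by
  induction l with
  | nil => simp at hx
  | cons y t ih =>
    intro init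
    rcases List.mem_cons.mp hx with rfl | hx'
    · exact le_trans (le_max_right _ _) (pv_foldl_max_init_le _ _ _)
    · exact ih hx' _
theorem pv_foldl_max_le {α : Type} {l : List α} {g : α → Int} {init M : Int}
    (hinit : init ≤ M) (h : ∀ x ∈ l, g x ≤ M) :
    l.foldl (fun m x => max m (g x)) init ≤ M := by
  induction l generalizing init with
  | nil => simpa
  | cons x t ih =>
    exact ih (max_le hinit (h x (by simp))) (fun y hy => h y (by simp [hy]))
theorem pv_find_max_key {α : Type} {l : List α} {key : α → Int}
    (hp : l.Pairwise (fun a b => key b ≤ key a)) {p : α → Bool} {x : α}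
    (hf : l.find? p = some x) : ∀ y ∈ l, p y = true → key y ≤ key x := by
  induction l with
  | nil => simp at hf
  | cons z t ih =>
    rw [List.find?_cons] at hf
    rcases List.pairwise_cons.mp hp with ⟨hz, ht⟩
    by_cases hpz : p z
    · simp [hpz] at hf
      subst hf
      intro y hy hpy
      rcases List.mem_cons.mp hy with rfl | hy
      · exact le_refl _
      · exact hz y hy
    · simp [hpz] at hf
      intro y hy hpy
      rcases List.mem_cons.mp hy with rfl | hy
      · simp [hpy] at hpz
      · exact ih ht hf y hy hpy
theorem pv_foldl_max2_init_le {α : Type} (l : List α) (F G : α → Int) (init : Int) :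
    init ≤ l.foldl (fun m x => max (max m (F x)) (G x)) init := by
  induction l generalizing init with
  | nil => simp
  | cons x t ih => exact le_trans (le_trans (le_max_left _ _) (le_max_left _ _)) (ih _)
theorem pv_foldl_max2_mem {α : Type} (F G : α → Int) {l : List α} {x : α} (hx : x ∈ l) :
    ∀ init, max (F x) (G x) ≤ l.foldl (fun m y => max (max m (F y)) (G y)) init := by
  induction l with
  | nil => simp at hx
  | cons y t ih =>
    intro init
    rcases List.mem_cons.mp hx with rfl | hx'
    · refine le_trans ?_ (pv_foldl_max2_init_le t F G _)
      exact max_le (le_trans (le_max_right _ _) (le_max_left _ _)) (le_max_right _ _)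
    · exact ih hx' _
theorem pv_foldl_max2_le {α : Type} {l : List α} {F G : α → Int} {init M : Int}
    (hinit : init ≤ M) (h : ∀ x ∈ l, F x ≤ M ∧ G x ≤ M) :
    l.foldl (fun m x => max (max m (F x)) (G x)) init ≤ M := by
  induction l generalizing init with
  | nil => simpa
  | cons x t ih =>
    refine ih (max_le (max_le hinit (h x (by simp)).1) (h x (by simp)).2) ?_
    exact fun y hy => h y (by simp [hy])
theorem pv_shape_of_mem {n : Int} {pfx : List Int} {t : Int × Int × Int}
    (ht : t ∈ pvSegments n pfx) : pvShape n t.1 t.2.1 := by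
  obtain ⟨s, e, v⟩ := t
  rcases pv_mem_segments.mp ht with ⟨h1, h2, _⟩ | ⟨h1, h2, h3, _⟩
  · exact Or.inl ⟨h1, h2⟩
  · exact Or.inr ⟨h1, h2, h3⟩
theorem pv_val_of_mem {n : Int} {l : List Char} {t : Int × Int × Int}
    (ht : t ∈ pvSegments n ((List.range (n.toNat + 1)).map (pvP l))) :
    (t.1 = -1 ∧ t.2.1 = -1 ∧ t.2.2 = 0) ∨
    (0 ≤ t.1 ∧ t.1 ≤ t.2.1 ∧ t.2.1 ≤ n - 1 ∧ t.2.2 = pvPI l (t.2.1 + 1) - pvPI l t.1) := by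
  obtain ⟨s, e, v⟩ := t
  rcases pv_mem_segments.mp ht with ⟨h1, h2, h3⟩ | ⟨h1, h2, h3, h4⟩
  · exact Or.inl ⟨h1, h2, h3⟩
  · exact Or.inr ⟨h1, h2, h3, by rw [h4, pv_count_real h1 h2 h3]⟩
theorem pv_val_le_tot {n : Int} {l : List Char} {t : Int × Int × Int}
    (ht : t ∈ pvSegments n ((List.range (n.toNat + 1)).map (pvP l))) : t.2.2 ≤ pvPI l n := by
  rcases pv_val_of_mem ht with ⟨_, _, h⟩ | ⟨h1, h2, h3, h4⟩
  · rw [h]; exact pvPI_nonneg l n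
  · have hm := pvPI_mono (l := l) (show t.2.1 + 1 ≤ n by omega)
    have hz := pvPI_nonneg l t.1
    omega
theorem pv_mem_seg_pre {n : Int} {l : List Char} {c : Int} (h0 : 0 ≤ c) (h1 : c ≤ n - 1) :
    ((0 : Int), c, pvPI l (c + 1)) ∈ pvSegments n ((List.range (n.toNat + 1)).map (pvP l)) := by
  refine pv_mem_segments.mpr (Or.inr ⟨le_refl 0, h0, h1, ?_⟩)
  rw [pv_count_real (le_refl 0) h0 h1, pvPI_zero]
  ring
theorem pv_mem_seg_suf {n : Int} {l : List Char} {c : Int} (h0 : 0 ≤ c) (h1 : c ≤ n - 1) :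
    (c, n - 1, pvPI l n - pvPI l c) ∈ pvSegments n ((List.range (n.toNat + 1)).map (pvP l)) := by
  refine pv_mem_segments.mpr (Or.inr ⟨h0, h1, le_refl _, ?_⟩)
  rw [pv_count_real h0 h1 (le_refl _)]
  have : n - 1 + 1 = n := by ring
  rw [this]
theorem pv_mem_seg_sent {n : Int} {pfx : List Int} :
    ((-1 : Int), (-1 : Int), (0 : Int)) ∈ pvSegments n pfx :=
  pv_mem_segments.mpr (Or.inl ⟨rfl, rfl, rfl⟩)
theorem pv_main_pos {n : Int} {lA lB : List Char} (hn : 1 ≤ n)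
    (hlA : n ≤ (lA.length : Int)) (hlB : n ≤ (lB.length : Int)) :
    (PySem.List.sorted (pvSegments n (pvBuildPrefix n lA)) (fun t => t.2.2) true).foldl
      (fun maxRemoved sA =>
        match (PySem.List.sorted (pvSegments n (pvBuildPrefix n lB)) (fun t => t.2.2) true).find?
            (fun sB => pvPathExists n sA.1 sA.2.1 sB.1 sB.2.1) with
        | some sB => max maxRemoved (sA.2.2 + sB.2.2)
        | none => maxRemoved) 0
    = (PySem.List.pyRange 0 (n - 2) 1).foldl
        (fun best c =>
          max (max best (PySem.List.pyGetD (pvAltPrefix n lA) (c + 1) 0 +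
                PySem.List.pyGetD (pvAltPrefix n lB) n 0 -
                PySem.List.pyGetD (pvAltPrefix n lB) (c + 2) 0))
              (PySem.List.pyGetD (pvAltPrefix n lB) (c + 1) 0 +
                PySem.List.pyGetD (pvAltPrefix n lA) n 0 -
                PySem.List.pyGetD (pvAltPrefix n lA) (c + 2) 0))
        (max (PySem.List.pyGetD (pvAltPrefix n lA) n 0)
             (PySem.List.pyGetD (pvAltPrefix n lB) n 0)) := by
  have hn0 : (0 : Int) ≤ n := by omega
  rw [pv_buildPrefix_eq hn0 hlA, pv_buildPrefix_eq hn0 hlB,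
      pv_altPrefix_eq hn0 hlA, pv_altPrefix_eq hn0 hlB]
  set MA := (List.range (n.toNat + 1)).map (pvP lA) with hMAdef
  set MB := (List.range (n.toNat + 1)).map (pvP lB) with hMBdef
  have hgetA : ∀ i : Int, 0 ≤ i → i ≤ n → PySem.List.pyGetD MA i 0 = pvPI lA i := by
    intro i h0 h1
    exact pv_getD_mapRange h0 (by omega)
  have hgetB : ∀ i : Int, 0 ≤ i → i ≤ n → PySem.List.pyGetD MB i 0 = pvPI lB i := by
    intro i h0 h1
    exact pv_getD_mapRange h0 (by omega)
  set SA := PySem.List.sorted (pvSegments n MA) (fun t => t.2.2) true with hSAdef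
  set SB := PySem.List.sorted (pvSegments n MB) (fun t => t.2.2) true with hSBdef
  have hmemSA : ∀ t, t ∈ SA ↔ t ∈ pvSegments n MA := fun t =>
    PySem.List.mem_sorted (pvSegments n MA) (fun t => t.2.2) true t
  have hmemSB : ∀ t, t ∈ SB ↔ t ∈ pvSegments n MB := fun t =>
    PySem.List.mem_sorted (pvSegments n MB) (fun t => t.2.2) true t
  have hpairB : SB.Pairwise (fun a b => b.2.2 ≤ a.2.2) :=
    PySem.List.sorted_pairwise_rev (pvSegments n MB) (fun t => t.2.2)
  -- the B-side fold and its bounds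
  set totA := pvPI lA n with htotAdef
  set totB := pvPI lB n with htotBdef
  rw [hgetA n hn0 (le_refl n), hgetB n hn0 (le_refl n)]
  set FX : Int → Int := fun c => PySem.List.pyGetD MA (c + 1) 0 + totB - PySem.List.pyGetD MB (c + 2) 0 with hFXdef
  set FY : Int → Int := fun c => PySem.List.pyGetD MB (c + 1) 0 + totA - PySem.List.pyGetD MA (c + 2) 0 with hFYdef
  set Bres := (PySem.List.pyRange 0 (n - 2) 1).foldl
      (fun best c => max (max best (FX c)) (FY c)) (max totA totB) with hBresdef
  have hFXval : ∀ c : Int, 0 ≤ c → c < n - 2 → FX c = pvPI lA (c + 1) + totB - pvPI lB (c + 2) := by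
    intro c h0 h1
    rw [hFXdef]
    dsimp only
    rw [hgetA (c + 1) (by omega) (by omega), hgetB (c + 2) (by omega) (by omega)]
  have hFYval : ∀ c : Int, 0 ≤ c → c < n - 2 → FY c = pvPI lB (c + 1) + totA - pvPI lA (c + 2) := by
    intro c h0 h1
    rw [hFYdef]
    dsimp only
    rw [hgetB (c + 1) (by omega) (by omega), hgetA (c + 2) (by omega) (by omega)]
  -- find? always succeeds on members of SA
  have hsentB : ((-1 : Int), (-1 : Int), (0 : Int)) ∈ SB := (hmemSB _).mpr pv_mem_seg_sent
  have hfind : ∀ sA ∈ SA, ∃ sB, SB.find? (fun sB => pvPathExists n sA.1 sA.2.1 sB.1 sB.2.1) = some sB := by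
    intro sA hsA
    cases hf : SB.find? (fun sB => pvPathExists n sA.1 sA.2.1 sB.1 sB.2.1) with
    | some sB => exact ⟨sB, rfl⟩
    | none =>
      exfalso
      have := List.find?_eq_none.mp hf _ hsentB
      apply this
      show pvPathExists n sA.1 sA.2.1 (-1) (-1) = true
      refine (pv_pathExists_shape hn (pv_shape_of_mem ((hmemSA _).mp hsA)) (Or.inl ⟨rfl, rfl⟩)).mpr ?_
      right; left; norm_num
  set Gf : Int × Int × Int → Int := fun sA =>
    match SB.find? (fun sB => pvPathExists n sA.1 sA.2.1 sB.1 sB.2.1) with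
    | some sB => sA.2.2 + sB.2.2
    | none => 0
    with hGfdef
  have hcongr : SA.foldl
      (fun maxRemoved sA =>
        match SB.find? (fun sB => pvPathExists n sA.1 sA.2.1 sB.1 sB.2.1) with
        | some sB => max maxRemoved (sA.2.2 + sB.2.2)
        | none => maxRemoved) 0
      = SA.foldl (fun m sA => max m (Gf sA)) 0 := by
    refine PySem.List.foldl_congr_mem _ _ _ _ ?_
    intro acc sA hsA
    obtain ⟨sB, hf⟩ := hfind sA hsA
    rw [hGfdef]
    dsimp only
    rw [hf]
  rw [hcongr]
  set Ares := SA.foldl (fun m sA => max m (Gf sA)) 0 with hAresdef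
  -- G1 : every A-contribution is at most Bres
  have hG1 : ∀ sA ∈ SA, Gf sA ≤ Bres := by
    intro sA hsA
    obtain ⟨sB, hf⟩ := hfind sA hsA
    have hGval : Gf sA = sA.2.2 + sB.2.2 := by rw [hGfdef]; dsimp only; rw [hf]
    have hsBmem : sB ∈ pvSegments n MB := (hmemSB _).mp (List.mem_of_find?_eq_some hf)
    have hsAmem : sA ∈ pvSegments n MA := (hmemSA _).mp hsA
    have hps : pvPathExists n sA.1 sA.2.1 sB.1 sB.2.1 = true := by
      simpa using List.find?_some hf
    have hfeas : pvFeas sA.1 sA.2.1 sB.1 sB.2.1 :=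
      (pv_pathExists_shape hn (pv_shape_of_mem hsAmem) (pv_shape_of_mem hsBmem)).mp hps
    have htotA_le : totA ≤ max totA totB := le_max_left _ _
    have htotB_le : totB ≤ max totA totB := le_max_right _ _
    have hinit_le : max totA totB ≤ Bres := pv_foldl_max2_init_le _ _ _ _
    rcases pv_val_of_mem hsAmem with ⟨hA1, hA2, hA3⟩ | ⟨hA1, hA2, hA3, hA4⟩
    · -- sA is the sentinel
      have : sB.2.2 ≤ totB := pv_val_le_tot hsBmem
      omega
    · rcases pv_val_of_mem hsBmem with ⟨hB1, hB2, hB3⟩ | ⟨hB1, hB2, hB3, hB4⟩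
      · -- sB is the sentinel
        have : sA.2.2 ≤ totA := pv_val_le_tot hsAmem
        omega
      · -- both real: must be separated by a gap of ≥ 2
        rcases hfeas with h | h | hgap | hgap
        · omega
        · omega
        · -- sA left of sB : use split c = sA.2.1
          set c := sA.2.1 with hcdef
          have hc0 : 0 ≤ c := by omega
          have hc1 : c < n - 2 := by omega
          have hcm : c ∈ PySem.List.pyRange 0 (n - 2) 1 :=
            (PySem.List.mem_pyRange_one).mpr ⟨hc0, by omega⟩
          have hbound : max (FX c) (FY c) ≤ Bres := pv_foldl_max2_mem FX FY hcm _
          have hFX := hFXval c hc0 hc1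
          have m1 : pvPI lA (c + 1) - pvPI lA sA.1 ≤ pvPI lA (c + 1) := by
            have := pvPI_nonneg lA sA.1
            omega
          have m2 : pvPI lB (sB.2.1 + 1) ≤ totB := pvPI_mono (by omega)
          have m3 : pvPI lB (c + 2) ≤ pvPI lB sB.1 := pvPI_mono (by omega)
          have hle : sA.2.2 + sB.2.2 ≤ FX c := by
            rw [hFX, hA4, hB4]
            omega
          have : FX c ≤ max (FX c) (FY c) := le_max_left _ _
          omega
        · -- sB left of sA : use split c = sB.2.1
          set c := sB.2.1 with hcdef
          have hc0 : 0 ≤ c := by omega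
          have hc1 : c < n - 2 := by omega
          have hcm : c ∈ PySem.List.pyRange 0 (n - 2) 1 :=
            (PySem.List.mem_pyRange_one).mpr ⟨hc0, by omega⟩
          have hbound : max (FX c) (FY c) ≤ Bres := pv_foldl_max2_mem FX FY hcm _
          have hFY := hFYval c hc0 hc1
          have m1 : pvPI lB (c + 1) - pvPI lB sB.1 ≤ pvPI lB (c + 1) := by
            have := pvPI_nonneg lB sB.1
            omega
          have m2 : pvPI lA (sA.2.1 + 1) ≤ totA := pvPI_mono (by omega)
          have m3 : pvPI lA (c + 2) ≤ pvPI lA sA.1 := pvPI_mono (by omega)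
          have hle : sA.2.2 + sB.2.2 ≤ FY c := by
            rw [hFY, hA4, hB4]
            omega
          have : FY c ≤ max (FX c) (FY c) := le_max_right _ _
          omega
  -- A ≤ B
  have hAB : Ares ≤ Bres := by
    rw [hAresdef]
    refine pv_foldl_max_le ?_ hG1
    have h0 : (0 : Int) ≤ totA := pvPI_nonneg lA n
    have := pv_foldl_max2_init_le (PySem.List.pyRange 0 (n - 2) 1) FX FY (max totA totB)
    rw [← hBresdef] at this
    omega
  -- B ≤ A : each ingredient of Bres is at most Ares
  have hGlower : ∀ sA ∈ SA, ∀ w ∈ SB,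
      pvPathExists n sA.1 sA.2.1 w.1 w.2.1 = true → sA.2.2 + w.2.2 ≤ Gf sA := by
    intro sA hsA w hw hpw
    obtain ⟨sB, hf⟩ := hfind sA hsA
    have hGval : Gf sA = sA.2.2 + sB.2.2 := by rw [hGfdef]; dsimp only; rw [hf]
    have hkey : w.2.2 ≤ sB.2.2 := pv_find_max_key hpairB hf w hw hpw
    omega
  have hcontrib : ∀ sA ∈ SA, Gf sA ≤ Ares := fun sA hsA => pv_foldl_max_mem Gf hsA 0
  have htotA_le_A : totA ≤ Ares := by
    have hmem : ((0 : Int), n - 1, totA) ∈ SA := by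
      rw [hmemSA]
      have := pv_mem_seg_suf (l := lA) (n := n) (c := 0) (le_refl 0) (by omega)
      rwa [pvPI_zero, sub_zero] at this
    have hsent : ((-1 : Int), (-1 : Int), (0 : Int)) ∈ SB := hsentB
    have hpe : pvPathExists n (0 : Int) (n - 1) (-1 : Int) (-1 : Int) = true := by
      refine (pv_pathExists_shape hn (Or.inr ⟨le_refl 0, by omega, by omega⟩) (Or.inl ⟨rfl, rfl⟩)).mpr ?_
      right; left; norm_num
    have h1 := hGlower _ hmem _ hsent hpe
    have h2 := hcontrib _ hmem
    dsimp only at h1 h2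
    omega
  have htotB_le_A : totB ≤ Ares := by
    have hmemA : ((-1 : Int), (-1 : Int), (0 : Int)) ∈ SA := (hmemSA _).mpr pv_mem_seg_sent
    have hmemB : ((0 : Int), n - 1, totB) ∈ SB := by
      rw [hmemSB]
      have := pv_mem_seg_suf (l := lB) (n := n) (c := 0) (le_refl 0) (by omega)
      rwa [pvPI_zero, sub_zero] at this
    have hpe : pvPathExists n (-1 : Int) (-1 : Int) (0 : Int) (n - 1) = true := by
      refine (pv_pathExists_shape hn (Or.inl ⟨rfl, rfl⟩) (Or.inr ⟨le_refl 0, by omega, by omega⟩)).mpr ?_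
      left; norm_num
    have h1 := hGlower _ hmemA _ hmemB hpe
    have h2 := hcontrib _ hmemA
    dsimp only at h1 h2
    omega
  have hsplit_le_A : ∀ c ∈ PySem.List.pyRange 0 (n - 2) 1, FX c ≤ Ares ∧ FY c ≤ Ares := by
    intro c hc
    obtain ⟨hc0, hc1⟩ := (PySem.List.mem_pyRange_one).mp hc
    constructor
    · have hmemA : ((0 : Int), c, pvPI lA (c + 1)) ∈ SA :=
        (hmemSA _).mpr (pv_mem_seg_pre hc0 (by omega))
      have hmemB : (c + 2, n - 1, totB - pvPI lB (c + 2)) ∈ SB :=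
        (hmemSB _).mpr (pv_mem_seg_suf (by omega) (by omega))
      have hpe : pvPathExists n (0 : Int) c (c + 2) (n - 1) = true := by
        refine (pv_pathExists_shape hn (Or.inr ⟨le_refl 0, by omega, by omega⟩)
          (Or.inr ⟨by omega, by omega, by omega⟩)).mpr ?_
        right; right; left; omega
      have h1 := hGlower _ hmemA _ hmemB hpe
      have h2 := hcontrib _ hmemA
      have h3 := hFXval c hc0 (by omega)
      dsimp only at h1 h2
      omega
    · have hmemA : (c + 2, n - 1, totA - pvPI lA (c + 2)) ∈ SA :=
        (hmemSA _).mpr (pv_mem_seg_suf (by omega) (by omega))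
      have hmemB : ((0 : Int), c, pvPI lB (c + 1)) ∈ SB :=
        (hmemSB _).mpr (pv_mem_seg_pre hc0 (by omega))
      have hpe : pvPathExists n (c + 2) (n - 1) (0 : Int) c = true := by
        refine (pv_pathExists_shape hn (Or.inr ⟨by omega, by omega, by omega⟩)
          (Or.inr ⟨le_refl 0, by omega, by omega⟩)).mpr ?_
        right; right; right; omega
      have h1 := hGlower _ hmemA _ hmemB hpe
      have h2 := hcontrib _ hmemA
      have h3 := hFYval c hc0 (by omega)
      dsimp only at h1 h2
      omega
  have hBA : Bres ≤ Ares := by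
    rw [hBresdef]
    exact pv_foldl_max2_le (max_le htotA_le_A htotB_le_A) hsplit_le_A
  omega
theorem pv_main_nonpos {n : Int} (hn : n ≤ 0) (roadA roadB : String) :
    max_potholes_removed_bfs n roadA roadB = 0 := by
  unfold max_potholes_removed_bfs
  dsimp only
  have hseg : ∀ pfx : List Int, pvSegments n pfx = [(-1, -1, 0)] := by
    intro pfx
    rw [pv_segments_eq, PySem.List.pyRange_one_eq_nil hn]
    rfl
  rw [hseg, hseg]
  rw [PySem.List.sorted_rev_eq_self_of_pairwise [((-1 : Int), (-1 : Int), (0 : Int))]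
    (fun t => t.2.2) (List.pairwise_singleton _ _)]
  simp [pv_pathExists_nonpos hn]


-- ===== VERDICT (by name: the statement is the Claim_ definition above) =====
theorem max_potholes_removed_bfs_spec : Claim_equal_max_potholes_removed_bfs := by
  intro n roadA roadB hdom hpre
  unfold Spec_max_potholes_removed_bfs
  obtain ⟨hpA, hpB⟩ := hpre
  rw [PySem.Str.len_eq] at hpA hpB
  by_cases hn : n ≤ 0
  · rw [pv_main_nonpos hn]
    unfold max_potholes_removed_bfs_alt
    rw [if_pos hn]
  · unfold max_potholes_removed_bfs max_potholes_removed_bfs_alt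
    rw [if_neg hn]
    dsimp only
    exact pv_main_pos (by omega) hpA hpB
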